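-- pv_equiv track=rewrite | github.com/LRangg/MimoTree | mimotree_alignment.py | final_seeds
-- ===== SOURCE A (Python) =====
-- def remove_duplicates(seed_lists, sets):
--     res_sets = []
--     res_idx = []
--     for i in range(len(sets)):
--         if sets[i] in res_sets:
--             res_idx.append(i)
--         if sets[i] not in res_sets:
--             res_sets.append(sets[i])
--     for idx in sorted(res_idx, reverse=True):
--         del seed_lists[idx]
--     return seed_lists, res_sets
--
-- def remove_subsets(seed_lists, res_sets):
--     remove_idx = []
--     k = 0
--     j = 0
--     while j < len(res_sets):
--         k = j + 1
--         while k < len(res_sets):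
--             if res_sets[j].issubset(res_sets[k]) == True:
--                 remove_idx.append(j)
--             if res_sets[k].issubset(res_sets[j]) == True:
--                 remove_idx.append(k)
--             k = k + 1
--         j = j + 1
--     #find the idx of the subsets needed to be removed
--     res_remove_idx = []
--     for idx in remove_idx:
--         if idx not in res_remove_idx:
--             res_remove_idx.append(idx)
--     #remove duplicates from remove_idx
--     res_remove_idx.sort(reverse=True)
--     #sort res_remove_idx, values in reverse order
--     for indx in res_remove_idx:
--         del seed_lists[indx]
--     #remove subsets from seed_lists
--     return(seed_lists)
--
-- def find_all_paths(graph, start, end, path):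
--     path = path + [start]
--     if start == end:
--         return [path]
--     if start not in graph:
--         return []
--     paths = []
--     for node in graph[start]:
--         if node not in path:
--             newpaths = find_all_paths(graph, node, end, path)
--             for newpath in newpaths:
--                 paths.append(newpath)
--     return paths
--
-- def remove_unavbl(seeds, mimo_seq):
--     ini_seeds = []
--     for seed in seeds:
--         seed_seq = ''
--         for s in seed:
--             s_char = ''.join(list(filter(str.isalpha, s)))
--             seed_seq = seed_seq + s_char
--         if seed_seq in mimo_seq:
--             ini_seeds.append(seed)
--     return ini_seeds
--
-- def final_seeds(seed_lists, seed_graph, mimo_seq):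
--     seeds = []
--     for seed_cluster in seed_lists:
--         for i in range(len(seed_cluster)-1):
--             for j in range(i+1, len(seed_cluster)):
--                 path = []
--                 paths = find_all_paths(seed_graph, seed_cluster[i], seed_cluster[j], path)
--                 for p in paths:
--                     seeds.append(p)
--     seeds = remove_unavbl(seeds, mimo_seq)
--     seed_sets = []
--     for s in seeds:
--         seed_sets.append(set(s))
--     seeds, seed_sets = remove_duplicates(seeds, seed_sets)
--     seeds = remove_subsets(seeds, seed_sets)
--     return seeds
-- ===== SOURCE B (Python) =====
-- def find_all_paths(graph, start, end, path):
--     path = path + [start]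
--     if start == end:
--         return [path]
--     if start not in graph:
--         return []
--     paths = []
--     for node in graph[start]:
--         if node not in path:
--             newpaths = find_all_paths(graph, node, end, path)
--             for newpath in newpaths:
--                 paths.append(newpath)
--     return paths
--
-- def remove_unavbl(seeds, mimo_seq):
--     ini_seeds = []
--     for seed in seeds:
--         seed_seq = ''
--         for s in seed:
--             s_char = ''.join(list(filter(str.isalpha, s)))
--             seed_seq = seed_seq + s_char
--         if seed_seq in mimo_seq:
--             ini_seeds.append(seed)
--     return ini_seeds
--
-- def final_seeds(seed_lists, seed_graph, mimo_seq):
--     # path enumeration and availability filter: same as the original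
--     seeds = []
--     for seed_cluster in seed_lists:
--         for i in range(len(seed_cluster)-1):
--             for j in range(i+1, len(seed_cluster)):
--                 path = []
--                 paths = find_all_paths(seed_graph, seed_cluster[i], seed_cluster[j], path)
--                 for p in paths:
--                     seeds.append(p)
--     seeds = remove_unavbl(seeds, mimo_seq)
--     # dedup by set value, keeping the first occurrence, as (seed, set) pairs
--     pairs = []
--     seen = []
--     for seed in seeds:
--         fs = set(seed)
--         if fs not in seen:
--             seen.append(fs)
--             pairs.append((seed, fs))
--     # maximal sets: sort indices by set size descending, then one forward scan
--     # (a set survives iff it is not a subset of an already-kept, i.e. larger, set)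
--     order = sorted(range(len(pairs)), key=lambda i: len(pairs[i][1]), reverse=True)
--     kept_idx = []
--     kept_sets = []
--     for i in order:
--         fs = pairs[i][1]
--         if not any(fs.issubset(t) for t in kept_sets):
--             kept_idx.append(i)
--             kept_sets.append(fs)
--     # survivors in original order
--     return [seed for i, (seed, fs) in enumerate(pairs) if i in kept_idx]
-- ===== Notes on version B (the rewrite author's own statement) =====
-- stated objective: alternative
-- what changed: The final reduction is replaced: instead of the symmetric all-pairs subset double loop that marks indices and then deletes them back-to-front, B dedups into (seed, set) pairs in one pass and computes the maximal sets by sorting by set size descending followed by a single forward scan against the already-kept sets, returning the survivors in original order.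
import Mathlib
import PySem

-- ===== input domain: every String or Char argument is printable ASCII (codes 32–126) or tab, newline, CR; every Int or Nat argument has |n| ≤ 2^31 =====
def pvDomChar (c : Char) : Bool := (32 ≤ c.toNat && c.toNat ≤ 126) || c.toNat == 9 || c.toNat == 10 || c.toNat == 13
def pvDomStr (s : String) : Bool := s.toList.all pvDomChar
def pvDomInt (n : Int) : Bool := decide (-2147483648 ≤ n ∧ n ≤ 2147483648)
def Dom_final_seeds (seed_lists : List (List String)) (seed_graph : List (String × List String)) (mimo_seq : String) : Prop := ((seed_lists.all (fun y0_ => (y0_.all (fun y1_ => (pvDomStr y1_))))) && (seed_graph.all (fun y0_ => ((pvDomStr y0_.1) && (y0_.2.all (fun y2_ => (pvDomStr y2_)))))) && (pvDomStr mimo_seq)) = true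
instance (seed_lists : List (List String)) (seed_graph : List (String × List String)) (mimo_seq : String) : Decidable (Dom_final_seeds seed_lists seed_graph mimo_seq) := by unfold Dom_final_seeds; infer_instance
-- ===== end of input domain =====

-- B replaces A's symmetric all-pairs subset loop + back-to-front deletion by a
-- first-occurrence (seed, set) dedup pass and a sort-by-size-descending single
-- forward scan for maximal sets (objective: alternative algorithm, same results).

-- ===== PORT A =====
-- find_all_paths, remove_unavbl and the path-collecting triple loop are textually
-- identical in A and in B (B keeps them as-is), so both ports share these helpers.
-- The Python recursion of find_all_paths terminates because `path` gains one distinct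
-- graph key per recursing level; `fuel` (passed as number-of-keys + 2, an upper bound
-- on that depth) is only a totality guard, never exhausted on Python-reachable calls.
def find_all_paths (fuel : Nat) (graph : PySem.Dict String (List String)) (start finish : String) (path : List String) : List (List String) :=
  match fuel with
  | 0 => []
  | fuel + 1 =>
    let path := path ++ [start]
    if start = finish then [path]
    else if graph.contains start = false then []
    else
      (graph.getD start []).foldl (fun paths node =>
        if node ∈ path then paths
        else paths ++ find_all_paths fuel graph node finish path) []

def remove_unavbl (seeds : List (List String)) (mimo_seq : String) : List (List String) :=
  seeds.foldl (fun ini_seeds seed =>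
    let seed_seq := seed.foldl (fun acc s => acc ++ s.toList.filter PySem.Chars.isalpha) ([] : List Char)
    if PySem.Chars.isIn seed_seq mimo_seq.toList then ini_seeds ++ [seed] else ini_seeds) []

-- the triple loop over clusters and index pairs (identical text in A and B)
def collect_seeds (seed_lists : List (List String)) (graph : PySem.Dict String (List String)) : List (List String) :=
  seed_lists.foldl (fun seeds seed_cluster =>
    (PySem.List.pyRange 0 (PySem.List.len seed_cluster - 1) 1).foldl (fun seeds i =>
      (PySem.List.pyRange (i + 1) (PySem.List.len seed_cluster) 1).foldl (fun seeds j =>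
        (find_all_paths (graph.items.length + 2) graph (PySem.List.pyGetD seed_cluster i "")
            (PySem.List.pyGetD seed_cluster j "") []).foldl (fun seeds p => seeds ++ [p]) seeds)
        seeds) seeds) []

def remove_duplicates (seed_lists : List (List String)) (sets : List (PySem.Set String)) :
    List (List String) × List (PySem.Set String) :=
  let rs := (PySem.List.pyRange 0 (PySem.List.len sets) 1).foldl
    (fun (acc : List (PySem.Set String) × List Int) i =>
      let si := PySem.List.pyGetD sets i PySem.Set.empty
      -- `sets[i] in res_sets` on a list of Python sets compares by set equality
      let res_idx := if acc.1.any (fun t => PySem.Set.equal t si) then acc.2 ++ [i] else acc.2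
      let res_sets := if (acc.1.any (fun t => PySem.Set.equal t si)) = false then acc.1 ++ [si] else acc.1
      (res_sets, res_idx)) ([], [])
  -- `del seed_lists[idx]` on a nonnegative in-range idx is eraseIdx idx.toNat (exact there)
  let seed_lists := (PySem.List.sorted rs.2 (fun x => x) true).foldl
      (fun l idx => l.eraseIdx idx.toNat) seed_lists
  (seed_lists, rs.1)

def remove_subsets (seed_lists : List (List String)) (res_sets : List (PySem.Set String)) : List (List String) :=
  -- both while loops advance by 1, ported as folds over pyRange
  let remove_idx := (PySem.List.pyRange 0 (PySem.List.len res_sets) 1).foldl (fun acc j =>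
      (PySem.List.pyRange (j + 1) (PySem.List.len res_sets) 1).foldl (fun acc k =>
        let sj := PySem.List.pyGetD res_sets j PySem.Set.empty
        let sk := PySem.List.pyGetD res_sets k PySem.Set.empty
        let acc := if PySem.Set.issubset sj sk then acc ++ [j] else acc
        if PySem.Set.issubset sk sj then acc ++ [k] else acc) acc) ([] : List Int)
  let res_remove_idx := remove_idx.foldl (fun acc idx => if acc.contains idx then acc else acc ++ [idx]) []
  let res_remove_idx := PySem.List.sorted res_remove_idx (fun x => x) true
  res_remove_idx.foldl (fun l idx => l.eraseIdx idx.toNat) seed_lists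

def final_seeds (seed_lists : List (List String)) (seed_graph : List (String × List String)) (mimo_seq : String) : List (List String) :=
  let graph := PySem.Dict.ofList seed_graph
  let seeds := collect_seeds seed_lists graph
  let seeds := remove_unavbl seeds mimo_seq
  let seed_sets := seeds.foldl (fun acc s => acc ++ [PySem.Set.ofList s]) []
  let p := remove_duplicates seeds seed_sets
  remove_subsets p.1 p.2

-- ===== PORT B =====
def final_seeds_alt (seed_lists : List (List String)) (seed_graph : List (String × List String)) (mimo_seq : String) : List (List String) :=
  let graph := PySem.Dict.ofList seed_graph
  let seeds := collect_seeds seed_lists graph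
  let seeds := remove_unavbl seeds mimo_seq
  -- dedup by set value, first occurrence, as (seed, set) pairs (seen: list of sets, `in` = set equality)
  let sp := seeds.foldl (fun (acc : List (PySem.Set String) × List (List String × PySem.Set String)) seed =>
      let fs := PySem.Set.ofList seed
      if acc.1.any (fun t => PySem.Set.equal t fs) then acc
      else (acc.1 ++ [fs], acc.2 ++ [(seed, fs)])) ([], [])
  let pairs := sp.2
  -- maximal sets: sort indices by set size descending, one forward scan
  let order := PySem.List.sorted (PySem.List.pyRange 0 (PySem.List.len pairs) 1)
      (fun i => PySem.List.len (PySem.List.pyGetD pairs i ([], PySem.Set.empty)).2) true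
  let kept := order.foldl (fun (acc : List Int × List (PySem.Set String)) i =>
      let fs := (PySem.List.pyGetD pairs i ([], PySem.Set.empty)).2
      if acc.2.any (fun t => PySem.Set.issubset fs t) then acc
      else (acc.1 ++ [i], acc.2 ++ [fs])) ([], [])
  -- survivors in original order
  ((PySem.List.enumerate pairs).filter (fun p => kept.1.contains p.1)).map (fun p => p.2.1)

-- ===== PRECONDITION & SPEC =====
def Spec_final_seeds (seed_lists : List (List String)) (seed_graph : List (String × List String)) (mimo_seq : String) (out : List (List String)) : Prop := out = final_seeds_alt seed_lists seed_graph mimo_seq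
instance (seed_lists : List (List String)) (seed_graph : List (String × List String)) (mimo_seq : String) (out : List (List String)) : Decidable (Spec_final_seeds seed_lists seed_graph mimo_seq out) := by unfold Spec_final_seeds; infer_instance

-- ===== CLAIM (what is proved, stated in full; the proofs are below) =====
def Claim_equal_final_seeds : Prop := ∀ (seed_lists : List (List String)) (seed_graph : List (String × List String)) (mimo_seq : String), Dom_final_seeds seed_lists seed_graph mimo_seq → Spec_final_seeds seed_lists seed_graph mimo_seq (final_seeds seed_lists seed_graph mimo_seq)

-- ===== LEMMAS AND PROOFS =====

-- canonical first-occurrence dedup (by set value) into (seed, set) pairs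
def pvDedup (seen : List (PySem.Set String)) : List (List String) → List (List String × PySem.Set String)
  | [] => []
  | s :: rest =>
    if seen.any (fun t => PySem.Set.equal t (PySem.Set.ofList s)) then pvDedup seen rest
    else (s, PySem.Set.ofList s) :: pvDedup (seen ++ [PySem.Set.ofList s]) rest

-- indices (counting from s0) of the entries pvDedup drops
def pvDupIdx (seen : List (PySem.Set String)) (s0 : Int) : List (List String) → List Int
  | [] => []
  | s :: rest =>
    if seen.any (fun t => PySem.Set.equal t (PySem.Set.ofList s)) then s0 :: pvDupIdx seen (s0 + 1) rest
    else pvDupIdx (seen ++ [PySem.Set.ofList s]) (s0 + 1) rest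

-- the set at position i of the pair list, as both ports read it
def pvTi (P : List (List String × PySem.Set String)) (i : Int) : PySem.Set String :=
  (PySem.List.pyGetD P i ([], PySem.Set.empty)).2

-- "the set at i has a (strict, by freshness) superset at another position"
def pvRelB (P : List (List String × PySem.Set String)) (i : Int) : Bool :=
  (PySem.List.pyRange 0 (PySem.List.len P) 1).any
    (fun j => j != i && PySem.Set.issubset (pvTi P i) (pvTi P j))

-- B's dedup fold produces exactly pvDedup (with the seen-sets alongside)
lemma pv_b_dedup_eq (seeds : List (List String)) (seen : List (PySem.Set String))
    (pairs : List (List String × PySem.Set String)) :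
    seeds.foldl (fun (acc : List (PySem.Set String) × List (List String × PySem.Set String)) seed =>
      let fs := PySem.Set.ofList seed
      if acc.1.any (fun t => PySem.Set.equal t fs) then acc
      else (acc.1 ++ [fs], acc.2 ++ [(seed, fs)])) (seen, pairs)
    = (seen ++ (pvDedup seen seeds).map (·.2), pairs ++ pvDedup seen seeds) := by
  induction seeds generalizing seen pairs with
  | nil => simp [pvDedup]
  | cons s rest ih =>
    simp only [List.foldl_cons, pvDedup]
    by_cases h : seen.any (fun t => PySem.Set.equal t (PySem.Set.ofList s)) = true
    · simpa [h] using ih seen pairs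
    · simp only [Bool.not_eq_true] at h
      simpa [h, List.append_assoc] using ih (seen ++ [PySem.Set.ofList s]) (pairs ++ [(s, PySem.Set.ofList s)])

lemma pv_pvDedup_shape (l : List (List String)) :
    ∀ seen, ∀ p ∈ pvDedup seen l, p.2 = PySem.Set.ofList p.1 := by
  induction l with
  | nil => simp [pvDedup]
  | cons s rest ih =>
    intro seen p hp
    by_cases h : seen.any (fun t => PySem.Set.equal t (PySem.Set.ofList s)) = true
    · simp only [pvDedup, h, if_pos] at hp
      exact ih _ p hp
    · simp only [pvDedup, h, if_neg, Bool.not_eq_true, List.mem_cons] at hp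
      rcases hp with rfl | hp
      · rfl
      · exact ih _ p hp

-- the sets pvDedup produces are fresh w.r.t. seen and pairwise distinct (as sets)
lemma pv_pvDedup_fresh (l : List (List String)) :
    ∀ seen, ∀ t ∈ (pvDedup seen l).map (·.2), ∀ u ∈ seen, PySem.Set.equal u t = false := by
  induction l with
  | nil => simp [pvDedup]
  | cons s rest ih =>
    intro seen t ht u hu
    simp only [pvDedup] at ht
    by_cases hany : seen.any (fun t => PySem.Set.equal t (PySem.Set.ofList s)) = true
    · simp only [hany, if_pos] at ht
      exact ih _ t ht u hu
    · simp only [hany, if_neg, Bool.not_eq_true, List.map_cons, List.mem_cons] at ht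
      rcases ht with rfl | ht
      · simp only [List.any_eq_true, not_exists, not_and, Bool.not_eq_true] at hany
        exact hany u hu
      · exact ih _ t ht u (List.mem_append_left _ hu)

lemma pv_pvDedup_pairwise (l : List (List String)) :
    ∀ seen, ((pvDedup seen l).map (·.2)).Pairwise (fun a b => PySem.Set.equal a b = false) := by
  induction l with
  | nil => simp [pvDedup]
  | cons s rest ih =>
    intro seen
    simp only [pvDedup]
    split
    · exact ih _
    · simp only [List.map_cons, List.pairwise_cons]
      refine ⟨fun t ht => ?_, ih _⟩
      exact pv_pvDedup_fresh rest (seen ++ [PySem.Set.ofList s]) t ht _ (by simp)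

lemma pv_pvDupIdx_mem (l : List (List String)) :
    ∀ seen s0, ∀ x ∈ pvDupIdx seen s0 l, s0 ≤ x ∧ x < s0 + l.length := by
  induction l with
  | nil => simp [pvDupIdx]
  | cons s rest ih =>
    intro seen s0 x hx
    simp only [pvDupIdx] at hx
    have step : ∀ seen', x ∈ pvDupIdx seen' (s0 + 1) rest → s0 ≤ x ∧ x < s0 + (s :: rest).length := by
      intro seen' h
      have := ih seen' (s0 + 1) x h
      constructor <;> [omega; (simp only [List.length_cons]; push_cast; omega)]
    split at hx
    · rcases List.mem_cons.1 hx with rfl | hx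
      · simp only [List.length_cons]; push_cast; omega
      · exact step _ hx
    · exact step _ hx

lemma pv_pvDupIdx_pairwise (l : List (List String)) :
    ∀ seen s0, (pvDupIdx seen s0 l).Pairwise (· < ·) := by
  induction l with
  | nil => simp [pvDupIdx]
  | cons s rest ih =>
    intro seen s0
    simp only [pvDupIdx]
    split
    · exact List.pairwise_cons.2 ⟨fun x hx => by have := pv_pvDupIdx_mem rest seen (s0+1) x hx; omega, ih _ _⟩
    · exact ih _ _

lemma pv_exists_max_key (l : List Int) (f : Int → Int) (h : l ≠ []) :
    ∃ m ∈ l, ∀ x ∈ l, f x ≤ f m := by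
  induction l with
  | nil => exact absurd rfl h
  | cons a rest ih =>
    rcases eq_or_ne rest [] with rfl | hne
    · exact ⟨a, by simp, by simp⟩
    · obtain ⟨m, hm, hmax⟩ := ih hne
      by_cases hc : f a ≤ f m
      · exact ⟨m, List.mem_cons_of_mem _ hm, by
          intro x hx; rcases List.mem_cons.1 hx with rfl | hx
          · exact hc
          · exact hmax x hx⟩
      · exact ⟨a, List.mem_cons_self, by
          intro x hx; rcases List.mem_cons.1 hx with rfl | hx
          · exact le_refl _
          · exact le_trans (hmax x hx) (le_of_not_ge hc)⟩

-- a proper subset (subset but not set-equal) of a duplicate-free set is strictly smaller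
lemma pv_length_lt_of_ssubset (s t : PySem.Set String) (hs : s.Nodup)
    (hsub : s.issubset t = true) (hne : PySem.Set.equal s t = false) :
    s.length < t.length := by
  have hsubset : s ⊆ t := fun x hx => (PySem.Set.issubset_iff s t).1 hsub x hx
  have hsp : s.Subperm t := hs.subperm hsubset
  rcases lt_or_ge s.length t.length with h | h
  · exact h
  · exfalso
    have hperm : s.Perm t := hsp.perm_of_length_le h
    have : PySem.Set.equal s t = true := (PySem.Set.equal_iff s t).2 (fun x => hperm.mem_iff)
    simp [this] at hne

-- membership through a foldl whose step appends elements characterised by Q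
lemma pv_mem_foldl_iff {β : Type} (step : List Int → β → List Int) (Q : Int → β → Prop)
    (hstep : ∀ acc k x, x ∈ step acc k ↔ x ∈ acc ∨ Q x k) :
    ∀ (l : List β) (init : List Int) (x : Int),
      x ∈ l.foldl step init ↔ x ∈ init ∨ ∃ k ∈ l, Q x k := by
  intro l
  induction l with
  | nil => simp
  | cons a rest ih =>
    intro init x
    simp only [List.foldl_cons, ih, hstep, List.mem_cons]
    constructor
    · rintro ((h | h) | ⟨k, hk, hq⟩)
      · exact Or.inl h
      · exact Or.inr ⟨a, Or.inl rfl, h⟩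
      · exact Or.inr ⟨k, Or.inr hk, hq⟩
    · rintro (h | ⟨k, (rfl | hk), hq⟩)
      · exact Or.inl (Or.inl h)
      · exact Or.inl (Or.inr hq)
      · exact Or.inr ⟨k, hk, hq⟩

-- deleting a strictly decreasing list of in-range indices keeps exactly the other positions
lemma pv_erase_fold {α : Type} (ixs : List Int) : ∀ (xs : List α),
    ixs.Pairwise (fun a b => b < a) →
    (∀ i ∈ ixs, 0 ≤ i ∧ i < (xs.length : Int)) →
    ixs.foldl (fun l idx => l.eraseIdx idx.toNat) xs
    = ((PySem.List.enumerate xs 0).filter (fun p => !ixs.contains p.1)).map (·.2) := by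
  induction ixs with
  | nil =>
    intro xs _ _
    simp [PySem.List.map_snd_enumerate]
  | cons i rest ih =>
    intro xs hdec hb
    obtain ⟨h0, hilt⟩ := hb i List.mem_cons_self
    have hn : i.toNat < xs.length := by omega
    have hrest_lt : ∀ r ∈ rest, r < i := fun r hr => (List.pairwise_cons.1 hdec).1 r hr
    have hbr : ∀ r ∈ rest, 0 ≤ r ∧ r < ((xs.eraseIdx i.toNat).length : Int) := by
      intro r hr
      obtain ⟨hr0, _⟩ := hb r (List.mem_cons_of_mem _ hr)
      have := hrest_lt r hr
      rw [List.length_eraseIdx, if_pos hn]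
      omega
    rw [List.foldl_cons, ih _ (List.pairwise_cons.1 hdec).2 hbr]
    have hA : (xs.take i.toNat).length = i.toNat := by
      simp [List.length_take, Nat.le_of_lt hn]
    have hsplit : xs = xs.take i.toNat ++ xs[i.toNat] :: xs.drop (i.toNat + 1) := by
      conv_lhs => rw [← List.take_append_drop i.toNat xs]
      rw [List.drop_eq_getElem_cons hn]
    rw [List.eraseIdx_eq_take_drop_succ]
    conv_rhs => rw [hsplit]
    rw [PySem.List.enumerate_append, PySem.List.enumerate_append, PySem.List.enumerate_cons,
        List.filter_append, List.filter_append, List.map_append, List.map_append, hA]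
    congr 1
    · apply congrArg
      apply List.filter_congr
      intro p hp
      obtain ⟨k, hk, rfl⟩ := (PySem.List.mem_enumerate_iff _ _ _).1 hp
      rw [hA] at hk
      simp only [List.contains_cons]
      simp
      intro _
      omega
    · have hhead : ((!(i :: rest).contains ((0:Int) + (i.toNat : Int))) = false) := by
        simp only [List.contains_cons, Bool.not_eq_false', Bool.or_eq_true, beq_iff_eq]
        left; omega
      rw [List.filter_cons, hhead]
      simp only [Bool.false_eq_true, if_false]
      have htail1 : (PySem.List.enumerate (xs.drop (i.toNat + 1)) ((0:Int) + (i.toNat : Int))).filter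
          (fun p => !rest.contains p.1) = PySem.List.enumerate (xs.drop (i.toNat + 1)) ((0:Int) + (i.toNat : Int)) := by
        apply List.filter_eq_self.2
        intro p hp
        obtain ⟨k, hk, rfl⟩ := (PySem.List.mem_enumerate_iff _ _ _).1 hp
        simp only [Bool.not_eq_eq_eq_not, Bool.not_true, List.contains_eq_mem, decide_eq_false_iff_not]
        intro hmem
        have := hrest_lt _ hmem
        omega
      have htail2 : (PySem.List.enumerate (xs.drop (i.toNat + 1)) ((0:Int) + (i.toNat : Int) + 1)).filter
          (fun p => !(i :: rest).contains p.1) = PySem.List.enumerate (xs.drop (i.toNat + 1)) ((0:Int) + (i.toNat : Int) + 1) := by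
        apply List.filter_eq_self.2
        intro p hp
        obtain ⟨k, hk, rfl⟩ := (PySem.List.mem_enumerate_iff _ _ _).1 hp
        simp only [Bool.not_eq_eq_eq_not, Bool.not_true, List.contains_eq_mem, decide_eq_false_iff_not,
          List.mem_cons, not_or]
        constructor
        · omega
        · intro hmem
          have := hrest_lt _ hmem
          omega
      rw [htail1, htail2, PySem.List.map_snd_enumerate, PySem.List.map_snd_enumerate]

-- deleting the duplicate positions from the list leaves exactly the pvDedup survivors
lemma pv_kept_eq_dedup (l : List (List String)) :
    ∀ seen (s0 : Int),
    ((PySem.List.enumerate l s0).filter (fun p => !(pvDupIdx seen s0 l).contains p.1)).map (·.2)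
    = (pvDedup seen l).map (·.1) := by
  induction l with
  | nil => simp [pvDedup, pvDupIdx]
  | cons s rest ih =>
    intro seen s0
    rw [PySem.List.enumerate_cons]
    by_cases h : seen.any (fun t => PySem.Set.equal t (PySem.Set.ofList s)) = true
    · simp only [pvDupIdx, pvDedup, h, if_pos]
      rw [List.filter_cons]
      have hcond : (!(s0 :: pvDupIdx seen (s0 + 1) rest).contains s0) = false := by
        simp [List.contains_eq_mem]
      rw [hcond]
      simp only [Bool.false_eq_true, if_false]
      have hre : (PySem.List.enumerate rest (s0 + 1)).filter
            (fun p => !(s0 :: pvDupIdx seen (s0 + 1) rest).contains p.1)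
          = (PySem.List.enumerate rest (s0 + 1)).filter
            (fun p => !(pvDupIdx seen (s0 + 1) rest).contains p.1) := by
        apply List.filter_congr
        intro p hp
        obtain ⟨k, hk, rfl⟩ := (PySem.List.mem_enumerate_iff _ _ _).1 hp
        simp only [List.contains_cons]
        have hne : ((s0 + 1 + (k : Int)) == s0) = false := by rw [beq_eq_false_iff_ne]; omega
        simp [hne]
      rw [hre, ih]
    · simp only [pvDupIdx, pvDedup, h, if_neg, Bool.not_eq_true]
      rw [List.filter_cons]
      have hcond : (!(pvDupIdx (seen ++ [PySem.Set.ofList s]) (s0 + 1) rest).contains s0) = true := by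
        simp only [List.contains_eq_mem, Bool.not_eq_eq_eq_not, Bool.not_true, decide_eq_false_iff_not]
        intro hmem
        have := pv_pvDupIdx_mem rest (seen ++ [PySem.Set.ofList s]) (s0 + 1) s0 hmem
        omega
      rw [hcond]
      simp only [if_pos, List.map_cons]
      rw [ih]

-- A's duplicate-detection loop, read as a fold over (index, set) pairs
lemma pv_a_dedup_loop (l : List (List String)) :
    ∀ (s0 : Int) (seen : List (PySem.Set String)) (idx0 : List Int),
    (PySem.List.enumerate (l.map PySem.Set.ofList) s0).foldl
      (fun (acc : List (PySem.Set String) × List Int) p =>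
        let si := p.2
        let res_idx := if acc.1.any (fun t => PySem.Set.equal t si) then acc.2 ++ [p.1] else acc.2
        let res_sets := if (acc.1.any (fun t => PySem.Set.equal t si)) = false then acc.1 ++ [si] else acc.1
        (res_sets, res_idx)) (seen, idx0)
    = (seen ++ (pvDedup seen l).map (·.2), idx0 ++ pvDupIdx seen s0 l) := by
  induction l with
  | nil => intro s0 seen idx0; simp [pvDedup, pvDupIdx]
  | cons x rest ih =>
    intro s0 seen idx0
    rw [List.map_cons, PySem.List.enumerate_cons, List.foldl_cons]
    by_cases h : seen.any (fun t => PySem.Set.equal t (PySem.Set.ofList x)) = true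
    · simp only [pvDedup, pvDupIdx, h, if_pos, Bool.true_eq_false, if_false]
      simpa [h, List.append_assoc] using ih (s0 + 1) seen (idx0 ++ [s0])
    · simp only [pvDedup, pvDupIdx, h, Bool.not_eq_true, if_neg]
      have h' : seen.any (fun t => PySem.Set.equal t (PySem.Set.ofList x)) = false := by
        simpa using h
      simpa [h', List.append_assoc] using ih (s0 + 1) (seen ++ [PySem.Set.ofList x]) idx0

-- A's remove_duplicates computes exactly the pvDedup survivors and their sets
lemma pv_remove_duplicates_eq (seeds : List (List String)) :
    remove_duplicates seeds (seeds.map PySem.Set.ofList)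
    = ((pvDedup [] seeds).map (·.1), (pvDedup [] seeds).map (·.2)) := by
  have hfold : (PySem.List.pyRange 0 (PySem.List.len (seeds.map PySem.Set.ofList)) 1).foldl
      (fun (acc : List (PySem.Set String) × List Int) i =>
        let si := PySem.List.pyGetD (seeds.map PySem.Set.ofList) i PySem.Set.empty
        let res_idx := if acc.1.any (fun t => PySem.Set.equal t si) then acc.2 ++ [i] else acc.2
        let res_sets := if (acc.1.any (fun t => PySem.Set.equal t si)) = false then acc.1 ++ [si] else acc.1
        (res_sets, res_idx)) ([], [])
      = ((pvDedup [] seeds).map (·.2), pvDupIdx [] 0 seeds) := by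
    have := pv_a_dedup_loop seeds 0 [] []
    rw [PySem.List.enumerate_eq_map_pyRange (seeds.map PySem.Set.ofList) PySem.Set.empty,
        List.foldl_map] at this
    simpa using this
  have hpw := pv_pvDupIdx_pairwise seeds [] 0
  have hrev : PySem.List.sorted (pvDupIdx [] 0 seeds) (fun x => x) true
      = (pvDupIdx [] 0 seeds).reverse := by
    apply PySem.List.sorted_rev_eq_of_perm_of_pairwise_gt
    · exact (pvDupIdx [] 0 seeds).reverse_perm
    · rw [List.pairwise_reverse]; exact hpw
  have hdecr : (pvDupIdx [] 0 seeds).reverse.Pairwise (fun a b => b < a) := by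
    rw [List.pairwise_reverse]; exact hpw
  have hbnds : ∀ i ∈ (pvDupIdx [] 0 seeds).reverse, 0 ≤ i ∧ i < (seeds.length : Int) := by
    intro i hi
    have := pv_pvDupIdx_mem seeds [] 0 i (List.mem_reverse.1 hi)
    omega
  have herase : (pvDupIdx [] 0 seeds).reverse.foldl (fun l idx => l.eraseIdx idx.toNat) seeds
      = (pvDedup [] seeds).map (·.1) := by
    rw [pv_erase_fold _ seeds hdecr hbnds, ← pv_kept_eq_dedup seeds [] 0]
    apply congrArg
    apply List.filter_congr
    intro p hp
    simp [List.contains_eq_mem]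
  unfold remove_duplicates
  rw [hfold]
  simp only []
  rw [hrev, herase]

lemma pv_Ti_getElem (P : List (List String × PySem.Set String)) (j : Int)
    (h0 : 0 ≤ j) (hlt : j < (P.length : Int)) : pvTi P j = P[j.toNat].2 := by
  unfold pvTi
  rw [PySem.List.pyGetD_eq_getElem P _ h0 hlt]

lemma pv_Ti_nodup (P : List (List String × PySem.Set String))
    (hsh : ∀ p ∈ P, p.2 = PySem.Set.ofList p.1) (j : Int)
    (h0 : 0 ≤ j) (hlt : j < (P.length : Int)) : (pvTi P j).Nodup := by
  rw [pv_Ti_getElem P j h0 hlt, hsh _ (P.getElem_mem _)]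
  exact PySem.Set.nodup_ofList _

lemma pv_equal_false_symm (s t : PySem.Set String)
    (h : PySem.Set.equal s t = false) : PySem.Set.equal t s = false := by
  by_contra hne'
  rw [Bool.not_eq_false] at hne'
  have hmem := (PySem.Set.equal_iff t s).1 hne'
  have : PySem.Set.equal s t = true := (PySem.Set.equal_iff s t).2 (fun x => (hmem x).symm)
  simp [this] at h

lemma pv_Ti_ne (P : List (List String × PySem.Set String))
    (hpwne : (P.map (·.2)).Pairwise (fun a b => PySem.Set.equal a b = false))
    (p q : Int) (h0p : 0 ≤ p) (hp : p < (P.length : Int)) (h0q : 0 ≤ q) (hq : q < (P.length : Int))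
    (hne : p ≠ q) : PySem.Set.equal (pvTi P p) (pvTi P q) = false := by
  have key : ∀ (a b : Nat) (ha : a < P.length) (hb : b < P.length), a < b →
      PySem.Set.equal P[a].2 P[b].2 = false := by
    intro a b ha hb hab
    have := (List.pairwise_iff_getElem.1 hpwne) a b (by simpa) (by simpa) hab
    simpa using this
  rw [pv_Ti_getElem P p h0p hp, pv_Ti_getElem P q h0q hq]
  rcases lt_or_gt_of_ne (show p.toNat ≠ q.toNat by omega) with h | h
  · exact key _ _ (by omega) (by omega) h
  · exact pv_equal_false_symm _ _ (key _ _ (by omega) (by omega) h)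

lemma pv_relB_iff (P : List (List String × PySem.Set String)) (i : Int) :
    pvRelB P i = true ↔ ∃ j : Int, (0 ≤ j ∧ j < (P.length : Int)) ∧ j ≠ i ∧
      PySem.Set.issubset (pvTi P i) (pvTi P j) = true := by
  unfold pvRelB
  simp only [List.any_eq_true, PySem.List.mem_pyRange_one, PySem.List.len_eq,
    Bool.and_eq_true, bne_iff_ne]

lemma pv_sub_trans (a b c : PySem.Set String)
    (h1 : PySem.Set.issubset a b = true) (h2 : PySem.Set.issubset b c = true) :
    PySem.Set.issubset a c = true := by
  rw [PySem.Set.issubset_iff] at h1 h2 ⊢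
  exact fun x hx => h2 x (h1 x hx)

lemma pv_enumerate_map {α β : Type} (f : α → β) (l : List α) :
    ∀ s : Int, PySem.List.enumerate (l.map f) s
      = (PySem.List.enumerate l s).map (fun q => (q.1, f q.2)) := by
  induction l with
  | nil => intro s; simp
  | cons x rest ih =>
    intro s
    rw [List.map_cons, PySem.List.enumerate_cons, PySem.List.enumerate_cons, List.map_cons, ih]

lemma pv_ordered_dedup_eq_ofList (l : List Int) :
    l.foldl (fun acc idx => if acc.contains idx then acc else acc ++ [idx]) []
      = PySem.Set.ofList l := by
  rw [PySem.Set.ofList_eq_foldl]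
  rfl

-- A's remove_subsets keeps exactly the positions with no distinct superset
lemma pv_remove_subsets_eq (P : List (List String × PySem.Set String)) :
    remove_subsets (P.map (·.1)) (P.map (·.2))
    = ((PySem.List.enumerate P 0).filter (fun p => !pvRelB P p.1)).map (·.2.1) := by
  unfold remove_subsets
  set T := P.map (·.2) with hT
  have hTlen : (T.length : Int) = (P.length : Int) := by simp [hT]
  have hTi : ∀ j : Int, 0 ≤ j → j < (P.length : Int) →
      PySem.List.pyGetD T j PySem.Set.empty = pvTi P j := by
    intro j h0 hlt
    rw [PySem.List.pyGetD_eq_getElem T _ h0 (by omega), pv_Ti_getElem P j h0 hlt]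
    simp [hT]
  -- membership in the collected remove_idx list
  have hmem_inner : ∀ (j : Int) (acc : List Int) (x : Int),
      x ∈ (PySem.List.pyRange (j + 1) (PySem.List.len T) 1).foldl (fun acc k =>
        let sj := PySem.List.pyGetD T j PySem.Set.empty
        let sk := PySem.List.pyGetD T k PySem.Set.empty
        let acc := if PySem.Set.issubset sj sk then acc ++ [j] else acc
        if PySem.Set.issubset sk sj then acc ++ [k] else acc) acc
      ↔ x ∈ acc ∨ ∃ k ∈ PySem.List.pyRange (j + 1) (PySem.List.len T) 1,
          ((PySem.Set.issubset (PySem.List.pyGetD T j PySem.Set.empty) (PySem.List.pyGetD T k PySem.Set.empty) = true ∧ x = j) ∨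
           (PySem.Set.issubset (PySem.List.pyGetD T k PySem.Set.empty) (PySem.List.pyGetD T j PySem.Set.empty) = true ∧ x = k)) := by
    intro j acc x
    apply pv_mem_foldl_iff
    intro acc' k y
    simp only []
    split_ifs <;> simp_all [List.mem_append] <;> tauto
  have hmem_R : ∀ x : Int,
      x ∈ (PySem.List.pyRange 0 (PySem.List.len T) 1).foldl (fun acc j =>
        (PySem.List.pyRange (j + 1) (PySem.List.len T) 1).foldl (fun acc k =>
          let sj := PySem.List.pyGetD T j PySem.Set.empty
          let sk := PySem.List.pyGetD T k PySem.Set.empty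
          let acc := if PySem.Set.issubset sj sk then acc ++ [j] else acc
          if PySem.Set.issubset sk sj then acc ++ [k] else acc) acc) ([] : List Int)
      ↔ (0 ≤ x ∧ x < (P.length : Int)) ∧ pvRelB P x = true := by
    intro x
    rw [pv_mem_foldl_iff _
      (fun x j => ∃ k ∈ PySem.List.pyRange (j + 1) (PySem.List.len T) 1,
        ((PySem.Set.issubset (PySem.List.pyGetD T j PySem.Set.empty) (PySem.List.pyGetD T k PySem.Set.empty) = true ∧ x = j) ∨
         (PySem.Set.issubset (PySem.List.pyGetD T k PySem.Set.empty) (PySem.List.pyGetD T j PySem.Set.empty) = true ∧ x = k)))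
      (fun acc j y => hmem_inner j acc y) _ _ _]
    simp only [List.mem_nil_iff, false_or, PySem.List.mem_pyRange_one, PySem.List.len_eq]
    rw [hTlen]
    constructor
    · rintro ⟨j, ⟨hj0, hjn⟩, k, ⟨hk1, hkn⟩, hcase⟩
      rcases hcase with ⟨hsub, rfl⟩ | ⟨hsub, rfl⟩
      · refine ⟨⟨hj0, hjn⟩, (pv_relB_iff P x).2 ⟨k, ⟨by omega, by omega⟩, by omega, ?_⟩⟩
        rw [← hTi x hj0 hjn, ← hTi k (by omega) (by omega)]; exact hsub
      · refine ⟨⟨by omega, by omega⟩, (pv_relB_iff P x).2 ⟨j, ⟨hj0, hjn⟩, by omega, ?_⟩⟩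
        rw [← hTi j hj0 hjn, ← hTi x (by omega) (by omega)]; exact hsub
    · rintro ⟨⟨hx0, hxn⟩, hrel⟩
      obtain ⟨m, ⟨hm0, hmn⟩, hmne, hsub⟩ := (pv_relB_iff P x).1 hrel
      rw [← hTi x hx0 hxn, ← hTi m hm0 hmn] at hsub
      rcases lt_or_gt_of_ne hmne with hlt | hgt
      · -- m < x : use j := m, k := x, second disjunct
        exact ⟨m, ⟨hm0, hmn⟩, x, ⟨by omega, by omega⟩, Or.inr ⟨hsub, rfl⟩⟩
      · -- x < m : use j := x, k := m, first disjunct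
        exact ⟨x, ⟨hx0, hxn⟩, m, ⟨by omega, by omega⟩, Or.inl ⟨hsub, rfl⟩⟩
  simp only []
  rw [pv_ordered_dedup_eq_ofList]
  -- the sorted-descending duplicate list
  set R := (PySem.List.pyRange 0 (PySem.List.len T) 1).foldl (fun acc j =>
        (PySem.List.pyRange (j + 1) (PySem.List.len T) 1).foldl (fun acc k =>
          let sj := PySem.List.pyGetD T j PySem.Set.empty
          let sk := PySem.List.pyGetD T k PySem.Set.empty
          let acc := if PySem.Set.issubset sj sk then acc ++ [j] else acc
          if PySem.Set.issubset sk sj then acc ++ [k] else acc) acc) ([] : List Int) with hRdef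
  set ds := PySem.List.sorted (PySem.Set.ofList R) (fun x => x) true with hds
  have hperm : ds.Perm (PySem.Set.ofList R) := PySem.List.sorted_perm _ _ _
  have hnodupds : ds.Nodup := (hperm.nodup_iff).2 (PySem.Set.nodup_ofList R)
  have hled : ds.Pairwise (fun a b => b ≤ a) := PySem.List.sorted_pairwise_rev _ _
  have hdecr : ds.Pairwise (fun a b => b < a) :=
    (hled.and hnodupds).imp (fun h => lt_of_le_of_ne h.1 (Ne.symm h.2))
  have hmem_ds : ∀ x : Int, x ∈ ds ↔ x ∈ R := by
    intro x
    rw [hperm.mem_iff, PySem.Set.mem_ofList]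
  have hbnd : ∀ i ∈ ds, 0 ≤ i ∧ i < ((P.map (·.1)).length : Int) := by
    intro i hi
    have := ((hmem_R i).1 ((hmem_ds i).1 hi)).1
    simpa [List.length_map] using this
  rw [pv_erase_fold ds (P.map (·.1)) hdecr hbnd]
  have hfc : ((PySem.List.enumerate (P.map (·.1)) 0).filter (fun q => !ds.contains q.1))
      = ((PySem.List.enumerate (P.map (·.1)) 0).filter (fun q => !pvRelB P q.1)) := by
    apply List.filter_congr
    intro q hq
    obtain ⟨k, hk, rfl⟩ := (PySem.List.mem_enumerate_iff _ _ _).1 hq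
    rw [List.length_map] at hk
    have hcont : ds.contains ((0 : Int) + (k : Int)) = pvRelB P ((0 : Int) + (k : Int)) := by
      by_cases hrel : pvRelB P ((0 : Int) + (k : Int)) = true
      · have : ((0 : Int) + (k : Int)) ∈ R := (hmem_R _).2 ⟨⟨by omega, by omega⟩, hrel⟩
        rw [hrel]
        simp only [List.contains_eq_mem, decide_eq_true_eq]
        exact (hmem_ds _).2 this
      · have hnotR : ((0 : Int) + (k : Int)) ∉ R := fun hc => hrel ((hmem_R _).1 hc).2
        rw [Bool.not_eq_true] at hrel
        rw [hrel]
        simp only [List.contains_eq_mem, decide_eq_false_iff_not]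
        intro hc
        exact hnotR ((hmem_ds _).1 hc)
    rw [hcont]
  rw [hfc, pv_enumerate_map (·.1) P 0, List.filter_map, List.map_map]
  rfl

-- B's forward scan (over indices sorted by set size descending) keeps exactly the
-- positions with no distinct superset
lemma pv_scan (P : List (List String × PySem.Set String))
    (hsh : ∀ p ∈ P, p.2 = PySem.Set.ofList p.1)
    (hpwne : (P.map (·.2)).Pairwise (fun a b => PySem.Set.equal a b = false)) :
    ∀ (rest pre : List Int),
    (pre ++ rest).Pairwise (fun a b => (pvTi P b).length ≤ (pvTi P a).length) →
    (pre ++ rest).Nodup →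
    (∀ x ∈ pre ++ rest, 0 ≤ x ∧ x < (P.length : Int)) →
    (∀ x : Int, 0 ≤ x → x < (P.length : Int) → x ∈ pre ++ rest) →
    rest.foldl (fun (acc : List Int × List (PySem.Set String)) i =>
        let fs := (PySem.List.pyGetD P i ([], PySem.Set.empty)).2
        if acc.2.any (fun t => PySem.Set.issubset fs t) then acc
        else (acc.1 ++ [i], acc.2 ++ [fs]))
      (pre.filter (fun j => !pvRelB P j), (pre.filter (fun j => !pvRelB P j)).map (pvTi P))
    = ((pre ++ rest).filter (fun j => !pvRelB P j),
       ((pre ++ rest).filter (fun j => !pvRelB P j)).map (pvTi P)) := by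
  intro rest
  induction rest with
  | nil => intro pre _ _ _ _; simp
  | cons i rest' ih =>
    intro pre hpw hnd hbd hall
    rw [List.foldl_cons]
    obtain ⟨hi0, hin⟩ := hbd i (by simp)
    have hinotpre : i ∉ pre := by
      intro hc
      have hdisj := (List.nodup_append.1 hnd).2.2
      exact hdisj i hc i (by simp) rfl
    have hcond : (((pre.filter (fun j => !pvRelB P j)).map (pvTi P)).any
        (fun t => PySem.Set.issubset ((PySem.List.pyGetD P i ([], PySem.Set.empty)).2) t)) = pvRelB P i := by
      show (((pre.filter (fun j => !pvRelB P j)).map (pvTi P)).any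
        (fun t => PySem.Set.issubset (pvTi P i) t)) = pvRelB P i
      by_cases hrel : pvRelB P i = true
      · rw [hrel]
        obtain ⟨m, ⟨hm0, hmn⟩, hmne, hmsub⟩ := (pv_relB_iff P i).1 hrel
        have hmC : m ∈ (PySem.List.pyRange 0 (PySem.List.len P) 1).filter
            (fun j => j != i && PySem.Set.issubset (pvTi P i) (pvTi P j)) := by
          apply List.mem_filter.2
          refine ⟨?_, ?_⟩
          · simp only [PySem.List.mem_pyRange_one, PySem.List.len_eq]
            omega
          · simp only [Bool.and_eq_true, bne_iff_ne]
            exact ⟨hmne, hmsub⟩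
        obtain ⟨j, hjC, hjmax⟩ := pv_exists_max_key _ (fun j => ((pvTi P j).length : Int))
          (List.ne_nil_of_mem hmC)
        have hjmem := List.mem_filter.1 hjC
        have hjrange : 0 ≤ j ∧ j < (P.length : Int) := by
          have := hjmem.1
          simp only [PySem.List.mem_pyRange_one, PySem.List.len_eq] at this
          omega
        obtain ⟨hj0, hjn⟩ := hjrange
        have hj2 := hjmem.2
        simp only [Bool.and_eq_true, bne_iff_ne] at hj2
        obtain ⟨hjne, hjsub⟩ := hj2
        have hjrel : pvRelB P j = false := by
          by_contra hc
          rw [Bool.not_eq_false] at hc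
          obtain ⟨m', ⟨hm'0, hm'n⟩, hm'ne, hm'sub⟩ := (pv_relB_iff P j).1 hc
          have hsubim' : PySem.Set.issubset (pvTi P i) (pvTi P m') = true :=
            pv_sub_trans _ _ _ hjsub hm'sub
          have hm'nei : m' ≠ i := by
            intro heq
            subst heq
            have heqt : PySem.Set.equal (pvTi P j) (pvTi P m') = true := by
              apply (PySem.Set.equal_iff _ _).2
              intro x
              constructor
              · exact fun hx => (PySem.Set.issubset_iff _ _).1 hm'sub x hx
              · exact fun hx => (PySem.Set.issubset_iff _ _).1 hjsub x hx
            have := pv_Ti_ne P hpwne j m' hj0 hjn hm'0 hm'n (Ne.symm hm'ne)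
            rw [heqt] at this; cases this
          have hm'C : m' ∈ (PySem.List.pyRange 0 (PySem.List.len P) 1).filter
              (fun j => j != i && PySem.Set.issubset (pvTi P i) (pvTi P j)) := by
            apply List.mem_filter.2
            refine ⟨?_, ?_⟩
            · simp only [PySem.List.mem_pyRange_one, PySem.List.len_eq]; omega
            · simp only [Bool.and_eq_true, bne_iff_ne]; exact ⟨hm'nei, hsubim'⟩
          have hle := hjmax m' hm'C
          have hlt : (pvTi P j).length < (pvTi P m').length :=
            pv_length_lt_of_ssubset _ _ (pv_Ti_nodup P hsh j hj0 hjn) hm'sub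
              (pv_Ti_ne P hpwne j m' hj0 hjn hm'0 hm'n (Ne.symm hm'ne))
          omega
        have hjpre : j ∈ pre := by
          have hj_in : j ∈ pre ++ i :: rest' := hall j hj0 hjn
          rcases List.mem_append.1 hj_in with h | h
          · exact h
          · exfalso
            rcases List.mem_cons.1 h with rfl | hjr
            · exact hjne rfl
            · have hle : (pvTi P j).length ≤ (pvTi P i).length := by
                have h2 := (List.pairwise_append.1 hpw).2.1
                exact (List.pairwise_cons.1 h2).1 j hjr
              have hlt : (pvTi P i).length < (pvTi P j).length :=
                pv_length_lt_of_ssubset _ _ (pv_Ti_nodup P hsh i hi0 hin) hjsub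
                  (pv_Ti_ne P hpwne i j hi0 hin hj0 hjn (Ne.symm hjne))
              omega
        apply List.any_eq_true.2
        refine ⟨pvTi P j, List.mem_map_of_mem ?_, hjsub⟩
        apply List.mem_filter.2
        exact ⟨hjpre, by rw [hjrel]; rfl⟩
      · rw [Bool.not_eq_true] at hrel
        rw [hrel]
        apply List.any_eq_false.2
        intro t ht
        obtain ⟨j, hjf, rfl⟩ := List.mem_map.1 ht
        obtain ⟨hjpre, _⟩ := List.mem_filter.1 hjf
        by_contra hcc
        have hji : j ≠ i := fun heq => hinotpre (heq ▸ hjpre)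
        obtain ⟨hj0', hjn'⟩ := hbd j (List.mem_append_left _ hjpre)
        have : pvRelB P i = true := (pv_relB_iff P i).2 ⟨j, ⟨hj0', hjn'⟩, hji, hcc⟩
        rw [this] at hrel; cases hrel
    have hassoc : pre ++ i :: rest' = (pre ++ [i]) ++ rest' := by simp
    by_cases hrel : pvRelB P i = true
    · have hfeq : (pre ++ [i]).filter (fun j => !pvRelB P j)
          = pre.filter (fun j => !pvRelB P j) := by
        rw [List.filter_append]; simp [hrel]
      rw [hassoc] at hpw hnd hbd hall ⊢
      have hstep := ih (pre ++ [i]) hpw hnd hbd hall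
      rw [hfeq] at hstep
      simp only []
      rw [hcond, hrel]
      simpa using hstep
    · rw [Bool.not_eq_true] at hrel
      have hfeq : (pre ++ [i]).filter (fun j => !pvRelB P j)
          = pre.filter (fun j => !pvRelB P j) ++ [i] := by
        rw [List.filter_append]; simp [hrel]
      rw [hassoc] at hpw hnd hbd hall ⊢
      have hstep := ih (pre ++ [i]) hpw hnd hbd hall
      rw [hfeq, List.map_append] at hstep
      simp only []
      rw [hcond, hrel]
      simpa using hstep

-- the two tails (after the shared path enumeration and availability filter) agree
lemma pv_tail_eq (sd : List (List String)) :
    (let seed_sets := sd.foldl (fun acc s => acc ++ [PySem.Set.ofList s]) []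
     let p := remove_duplicates sd seed_sets
     remove_subsets p.1 p.2)
    =
    (let sp := sd.foldl (fun (acc : List (PySem.Set String) × List (List String × PySem.Set String)) seed =>
        let fs := PySem.Set.ofList seed
        if acc.1.any (fun t => PySem.Set.equal t fs) then acc
        else (acc.1 ++ [fs], acc.2 ++ [(seed, fs)])) ([], [])
     let pairs := sp.2
     let order := PySem.List.sorted (PySem.List.pyRange 0 (PySem.List.len pairs) 1)
        (fun i => PySem.List.len (PySem.List.pyGetD pairs i ([], PySem.Set.empty)).2) true
     let kept := order.foldl (fun (acc : List Int × List (PySem.Set String)) i =>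
        let fs := (PySem.List.pyGetD pairs i ([], PySem.Set.empty)).2
        if acc.2.any (fun t => PySem.Set.issubset fs t) then acc
        else (acc.1 ++ [i], acc.2 ++ [fs])) ([], [])
     ((PySem.List.enumerate pairs).filter (fun p => kept.1.contains p.1)).map (fun p => p.2.1)) := by
  have hsh := pv_pvDedup_shape sd []
  have hpwne := pv_pvDedup_pairwise sd []
  simp only []
  have hseed : sd.foldl (fun acc s => acc ++ [PySem.Set.ofList s]) ([] : List (PySem.Set String))
      = sd.map PySem.Set.ofList := by
    simpa using PySem.List.foldl_append_singleton_eq_map PySem.Set.ofList sd []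
  rw [hseed, pv_remove_duplicates_eq sd]
  simp only []
  rw [pv_remove_subsets_eq (pvDedup [] sd)]
  rw [pv_b_dedup_eq sd [] []]
  simp only [List.nil_append]
  set P := pvDedup [] sd with hP
  set order := PySem.List.sorted (PySem.List.pyRange 0 (PySem.List.len P) 1)
      (fun i => PySem.List.len (PySem.List.pyGetD P i ([], PySem.Set.empty)).2) true with horder
  have hperm : order.Perm (PySem.List.pyRange 0 (PySem.List.len P) 1) :=
    PySem.List.sorted_perm _ _ _
  have hpwk := PySem.List.sorted_pairwise_rev (PySem.List.pyRange 0 (PySem.List.len P) 1)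
      (fun i => PySem.List.len (PySem.List.pyGetD P i ([], PySem.Set.empty)).2)
  have hpwn : order.Pairwise (fun a b => (pvTi P b).length ≤ (pvTi P a).length) := by
    refine hpwk.imp ?_
    intro a b h
    simpa [PySem.List.len_eq] using h
  have hnd : order.Nodup := (hperm.nodup_iff).2 (PySem.List.nodup_pyRange_one _ _)
  have hbd : ∀ x ∈ order, 0 ≤ x ∧ x < (P.length : Int) := by
    intro x hx
    have := hperm.mem_iff.1 hx
    simpa [PySem.List.mem_pyRange_one, PySem.List.len_eq] using this
  have hall : ∀ x : Int, 0 ≤ x → x < (P.length : Int) → x ∈ order := by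
    intro x h0 hlt
    apply hperm.mem_iff.2
    simp [PySem.List.mem_pyRange_one, PySem.List.len_eq]
    omega
  have hscan := pv_scan P hsh hpwne order []
    (by simpa using hpwn) (by simpa using hnd) (by simpa using hbd) (by simpa using hall)
  simp only [List.filter_nil, List.map_nil, List.nil_append] at hscan
  rw [hscan]
  simp only []
  apply congrArg
  apply List.filter_congr
  intro q hq
  obtain ⟨k, hk, rfl⟩ := (PySem.List.mem_enumerate_iff _ _ _).1 hq
  have hmem_ord : ((k : Int)) ∈ order := hall _ (by omega) (by omega)
  simp only [zero_add]
  by_cases hrel : pvRelB P (k : Int) = true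
  · rw [hrel]
    simp [List.contains_eq_mem, List.mem_filter, hrel]
  · rw [Bool.not_eq_true] at hrel
    rw [hrel]
    simp [List.contains_eq_mem, List.mem_filter, hrel, hmem_ord]

-- ===== VERDICT (by name: the statement is the Claim_ definition above) =====
theorem final_seeds_spec : Claim_equal_final_seeds := by
  intro seed_lists seed_graph mimo_seq _
  unfold Spec_final_seeds final_seeds final_seeds_alt
  exact pv_tail_eq (remove_unavbl (collect_seeds seed_lists (PySem.Dict.ofList seed_graph)) mimo_seq)
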